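-- pv_equiv track=rewrite | github.com/hellemg/AIProject3 | Game.py | get_possible_actions_from_state
-- ===== SOURCE A (Python) =====
-- def get_possible_actions_from_state(board):
--     """
--     :param board: ndarray, ledge-board
--
--     :returns: list tuples with possible actions to take
--     """
--     actions = []
--     dists = 0
--     for i, cell in enumerate(board):
--         # Go through the board from the left to the right
--         # If the cell is 0, save it as it can be used for the dist
--         # If the cell is not 0, use all saved dists together with the cell
--         if cell == 0:
--             dists += 1
--         else:
--             actions += [(i, d+1) for d in range(dists)]
--             dists = 0
--     # Add first cell to actions, can be picked up
--     if board[0] != 0: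
--         actions.append((0, 0))
--     return actions
-- ===== SOURCE B (Python) =====
-- def get_possible_actions_from_state(board):
--     # Generate-and-test: enumerate every candidate move (i, d) and keep it iff
--     # the d cells left of the coin at i are all empty (a legality predicate on
--     # a board slice), instead of carrying a running zero-counter.
--     actions = [(i, d)
--                for i, cell in enumerate(board) if cell != 0
--                for d in range(1, i + 1)
--                if all(c == 0 for c in board[i - d:i])]
--     if board[0] != 0:
--         actions.append((0, 0))
--     return actions
-- ===== Notes on version B (the rewrite author's own statement) =====
-- stated objective: alternative
-- what changed: B enumerates every candidate move (i, d) and keeps it iff the slice of d cells left of the coin is all zero (generate-and-test with a legality predicate on board slices), instead of A's single pass with a running zero-counter; it trades speed for a declarative check.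
import Mathlib
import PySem

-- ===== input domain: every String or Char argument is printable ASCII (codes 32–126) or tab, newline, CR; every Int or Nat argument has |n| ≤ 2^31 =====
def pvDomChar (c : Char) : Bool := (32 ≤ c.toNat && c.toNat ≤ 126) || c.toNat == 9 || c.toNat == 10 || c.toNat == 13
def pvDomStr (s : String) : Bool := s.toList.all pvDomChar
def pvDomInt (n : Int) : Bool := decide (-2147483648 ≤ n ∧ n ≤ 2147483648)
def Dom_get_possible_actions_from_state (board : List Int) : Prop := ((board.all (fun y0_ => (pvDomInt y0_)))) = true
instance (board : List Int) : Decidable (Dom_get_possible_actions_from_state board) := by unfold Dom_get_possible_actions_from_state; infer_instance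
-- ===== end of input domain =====

-- B checks each candidate move (i, d) by testing that the board slice left of the coin is
-- all zero, instead of A's running zero-counter; return values proved equal on non-empty boards.

-- ===== PORT A =====
-- A's for-loop over enumerate(board) with accumulators (actions, dists), as structural recursion.
def pvLoopA : List Int → Int → Int → List (Int × Int)
  | [], _, _ => []
  | c :: rest, i, dists =>
    if c = 0 then pvLoopA rest (i + 1) (dists + 1)
    else (PySem.List.pyRange 0 dists 1).map (fun d => (i, d + 1)) ++ pvLoopA rest (i + 1) 0

def get_possible_actions_from_state (board : List Int) : List (Int × Int) :=
  let actions := pvLoopA board 0 0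
  match PySem.List.pyGet? board 0 with
  | none => actions   -- the first-cell access raises IndexError in Python; excluded by Pre_
  | some c => if c ≠ 0 then actions ++ [((0 : Int), (0 : Int))] else actions

-- ===== PORT B =====
-- the inner 'for d in range(1, i+1) if all(c == 0 for c in board[i-d:i])' of the comprehension
def pvRowB (board : List Int) (i : Int) : List (Int × Int) :=
  ((PySem.List.pyRange 1 (i + 1) 1).filter
      (fun d => (PySem.List.slice board (some (i - d)) (some i)).all (fun c => c == 0))).map
    (fun d => (i, d))

def get_possible_actions_from_state_alt (board : List Int) : List (Int × Int) :=
  let actions := (PySem.List.enumerate board 0).flatMap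
    (fun p => if p.2 ≠ 0 then pvRowB board p.1 else [])
  match PySem.List.pyGet? board 0 with
  | none => actions   -- the first-cell access raises IndexError in Python; excluded by Pre_
  | some c => if c ≠ 0 then actions ++ [((0 : Int), (0 : Int))] else actions

-- ===== PRECONDITION & SPEC =====
-- Pre_ excludes only the empty board, on which the Python A raises IndexError at the first-cell access.
def Pre_get_possible_actions_from_state (board : List Int) : Prop := board ≠ []
instance (board : List Int) : Decidable (Pre_get_possible_actions_from_state board) := by unfold Pre_get_possible_actions_from_state; infer_instance
def pvWitness_get_possible_actions_from_state : List Int := [1, 0, 2]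

def Spec_get_possible_actions_from_state (board : List Int) (out : List (Int × Int)) : Prop := out = get_possible_actions_from_state_alt board
instance (board : List Int) (out : List (Int × Int)) : Decidable (Spec_get_possible_actions_from_state board out) := by unfold Spec_get_possible_actions_from_state; infer_instance

-- ===== CLAIM (what is proved, stated in full; the proofs are below) =====
def Claim_equal_get_possible_actions_from_state : Prop := ∀ (board : List Int), Dom_get_possible_actions_from_state board → Pre_get_possible_actions_from_state board → Spec_get_possible_actions_from_state board (get_possible_actions_from_state board)

-- ===== LEMMAS AND PROOFS =====

-- the slice board[i-k:i] at a coin index i = r.length is the reversed k-prefix of the reversed prefix r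
lemma slice_test (r rest : List Int) (k : Nat) (h1 : 1 ≤ k) (h2 : k ≤ r.length) :
    ((PySem.List.slice (r.reverse ++ rest) (some ((r.length : Int) - (k : Int))) (some (r.length : Int))).all
      (fun c => c == 0)) = (r.take k).all (fun c => c == 0) := by
  rw [PySem.List.slice_toNat _ (by omega) (by positivity)]
  have h3 : ((r.length : Int) - (k : Int)).toNat = r.length - k := by omega
  have h4 : ((r.length : Int)).toNat = r.length := by omega
  rw [h3, h4]
  rw [List.drop_append_of_le_length (by simp)]
  rw [List.take_append_of_le_length (by simp)]
  rw [← List.reverse_take]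
  have h7 : r.length - (r.length - k) = k := by omega
  rw [h7, List.take_of_length_le (by simp), List.all_reverse]


-- under the run invariant, the slice test holds exactly for distances k ≤ d
lemma take_all_zero (r : List Int) (d k : Nat) (h2 : k ≤ r.length)
    (hz : r.take d = List.replicate d 0)
    (hnz : ∀ x, (r.drop d).head? = some x → x ≠ 0) :
    ((r.take k).all (fun c => c == 0)) = decide (k ≤ d) := by
  by_cases h : k ≤ d
  · have hk : r.take k = List.replicate k 0 := by
      have : r.take k = (r.take d).take k := by rw [List.take_take]; congr 1; omega
      rw [this, hz, List.take_replicate]; congr 1; omega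
    rw [hk]; simp [h]
  · have hd : d < r.length := by omega
    obtain ⟨y, t, hy⟩ : ∃ y t, r.drop d = y :: t := by
      cases hdr : r.drop d with
      | nil => exfalso; have := List.drop_eq_nil_iff.mp hdr; omega
      | cons y t => exact ⟨y, t, rfl⟩
    have hyne : y ≠ 0 := hnz y (by rw [hy]; rfl)
    have hmem : y ∈ r.take k := by
      have hsplit : r.take k = r.take d ++ (r.drop d).take (k - d) := by
        rw [← List.take_add]
        congr 1; omega
      rw [hsplit, hy]
      have hmem2 : y ∈ (y :: t).take (k - d) := by
        cases hkd : k - d with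
        | zero => omega
        | succ m => simp [List.take_succ_cons]
      exact List.mem_append_right _ hmem2
    simp [h]
    exact ⟨y, hmem, hyne⟩


-- B's row of filtered candidate distances at a coin equals A's burst from the counter d
lemma pvRow_eq (r rest : List Int) (d : Nat)
    (hz : r.take d = List.replicate d 0)
    (hnz : ∀ x, (r.drop d).head? = some x → x ≠ 0) :
    pvRowB (r.reverse ++ rest) (r.length : Int) =
      (PySem.List.pyRange 0 (d : Int) 1).map (fun x => ((r.length : Int), x + 1)) := by
  have hdlen : d ≤ r.length := by
    have := congrArg List.length hz; simp at this; omega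
  unfold pvRowB
  have hfc : (PySem.List.pyRange 1 ((r.length:Int) + 1)).filter
      (fun d' => (PySem.List.slice (r.reverse ++ rest) (some ((r.length:Int) - d')) (some (r.length:Int))).all (fun c => c == 0))
      = (PySem.List.pyRange 1 ((r.length:Int) + 1)).filter (fun d' => decide (d' ≤ (d : Int))) := by
    apply List.filter_congr
    intro x hx
    rw [PySem.List.mem_pyRange_one] at hx
    have hk : x = ((x.toNat : Nat) : Int) := by omega
    have h1k : 1 ≤ x.toNat := by omega
    have h2k : x.toNat ≤ r.length := by omega
    rw [hk, slice_test r rest x.toNat h1k h2k, take_all_zero r d x.toNat h2k hz hnz]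
    simp
  rw [hfc]
  rw [PySem.List.pyRange_one_append 1 ((d:Int)+1) ((r.length:Int)+1) (by omega) (by omega)]
  rw [List.filter_append]
  rw [List.filter_eq_self.mpr (fun x hx => by
        rw [PySem.List.mem_pyRange_one] at hx; simp; omega)]
  rw [List.filter_eq_nil_iff.mpr (fun x hx => by
        rw [PySem.List.mem_pyRange_one] at hx; simp; omega)]
  rw [List.append_nil]
  rw [PySem.List.pyRange_one, PySem.List.pyRange_one]
  have : ((d:Int) + 1 - 1).toNat = ((d:Int) - 0).toNat := by omega
  rw [this]
  simp only [List.map_map]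
  exact List.map_congr_left (fun k _ => by simp; ring)


-- core invariant: A's loop over the suffix equals B's comprehension over it
lemma pvLoopA_eq_flatMap (board : List Int) : ∀ (s r : List Int) (d : Nat),
    board = r.reverse ++ s →
    r.take d = List.replicate d 0 →
    (∀ x, (r.drop d).head? = some x → x ≠ 0) →
    pvLoopA s (r.length : Int) (d : Int) =
      (PySem.List.enumerate s (r.length : Int)).flatMap
        (fun p => if p.2 ≠ 0 then pvRowB board p.1 else []) := by
  intro s
  induction s with
  | nil => intro r d _ _ _; simp [pvLoopA, PySem.List.enumerate]
  | cons c s' ih =>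
    intro r d hb hz hnz
    rw [PySem.List.enumerate_cons]
    have hb' : board = r.reverse ++ c :: s' := hb
    by_cases hc : c = 0
    · subst hc
      have e1 : pvLoopA (0 :: s') (r.length : Int) (d : Int)
          = pvLoopA s' ((r.length : Int) + 1) ((d : Int) + 1) := by simp [pvLoopA]
      have h1 : (r.length : Int) + 1 = (((0 :: r) : List Int).length : Int) := by simp
      have h2 : (d : Int) + 1 = ((d + 1 : Nat) : Int) := by push_cast; ring
      have hb2 : board = (0 :: r).reverse ++ s' := by
        rw [hb']; simp
      rw [e1, h1, h2, ih (0 :: r) (d + 1) hb2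
        (by simp [List.take_succ_cons, hz, List.replicate_succ])
        (by simpa using hnz)]
      simp
    · have e1 : pvLoopA (c :: s') (r.length : Int) (d : Int)
          = (PySem.List.pyRange 0 (d : Int) 1).map (fun x => ((r.length : Int), x + 1))
            ++ pvLoopA s' ((r.length : Int) + 1) 0 := by simp [pvLoopA, hc]
      have h1 : (r.length : Int) + 1 = (((c :: r) : List Int).length : Int) := by simp
      have hb2 : board = (c :: r).reverse ++ s' := by
        rw [hb']; simp
      have e2 : (if ((r.length : Int), c).2 ≠ 0 then pvRowB board ((r.length : Int), c).1 else [])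
          = pvRowB board (r.length : Int) := by simp [hc]
      rw [e1, List.flatMap_cons, e2]
      congr 1
      · rw [hb', pvRow_eq r (c :: s') d hz hnz]
      · rw [h1]
        have hrec := ih (c :: r) 0 hb2 (by simp) (by intro x hx; simp at hx; omega)
        simpa using hrec

theorem pv_main (board : List Int) :
    get_possible_actions_from_state board = get_possible_actions_from_state_alt board := by
  unfold get_possible_actions_from_state get_possible_actions_from_state_alt
  have h := pvLoopA_eq_flatMap board board [] 0 (by simp) (by simp) (by simp)
  simp only [List.length_nil, Nat.cast_zero] at h
  rw [h]

-- ===== VERDICT (by name: the statement is the Claim_ definition above) =====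
theorem get_possible_actions_from_state_spec : Claim_equal_get_possible_actions_from_state := by
  intro board _ _
  exact pv_main board
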